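-- pv_equiv track=rewrite | github.com/PoisedDok/AetherArena | aether-backend/services/docling/docling_api_server.py | clean_vlm_output
-- ===== SOURCE A (Python) =====
-- def clean_vlm_output(content: str, model: str) -> str:
--     """Clean up VLM output to remove corrupted or repetitive content."""
--
--     if not content:
--         return content
--
--     # Remove fake tokens and corrupted sequences
--     content = content.replace("<fake_token_around_image>", "")
--     content = content.replace("<end_of_utterance>", "")
--
--     # For SmolDocling, extract only the first doctag block
--     if "smoldocling" in model.lower() and "<doctag>" in content:
--         # Find first doctag block
--         start = content.find("<doctag>")
--         if start != -1:
--             # Look for end or reasonable stopping point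
--             end = content.find("</doctag>", start)
--             if end == -1:
--                 # If no proper end tag, look for other stopping indicators
--                 end = content.find("\nUser:", start)
--                 if end == -1:
--                     end = content.find("Assistant:", start)
--                 if end == -1:
--                     end = content.find("<doctag>", start + 8)  # Find next doctag
--                 if end == -1:
--                     # Take only first reasonable chunk (up to 2000 chars)
--                     end = min(start + 2000, len(content))
--             else:
--                 end += 9  # Include </doctag>
--
--             content = content[start:end]
--
--     # Remove excessive repetition (more than 3 consecutive identical lines)
--     lines = content.split('\n')
--     cleaned_lines = []
--     last_line = None
--     repeat_count = 0
--
--     for line in lines: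
--         if line == last_line:
--             repeat_count += 1
--             if repeat_count < 3:  # Allow up to 2 repetitions
--                 cleaned_lines.append(line)
--         else:
--             repeat_count = 0
--             cleaned_lines.append(line)
--             last_line = line
--
--     content = '\n'.join(cleaned_lines)
--
--     # Truncate if still too long (safety measure)
--     if len(content) > 10000:
--         content = content[:10000] + "\n[Content truncated due to length]"
--
--     return content.strip()
-- ===== SOURCE B (Python) =====
-- def _first_doctag(content):
--     start = content.find("<doctag>")
--     if start == -1:
--         return content
--     end = content.find("</doctag>", start)
--     if end != -1:
--         return content[start:end + 9]
--     end = next((p for p in (content.find("\nUser:", start),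
--                             content.find("Assistant:", start),
--                             content.find("<doctag>", start + 8)) if p != -1),
--                min(start + 2000, len(content)))
--     return content[start:end]
--
--
-- def clean_vlm_output(content: str, model: str) -> str:
--     """Clean up VLM output to remove corrupted or repetitive content."""
--     if not content:
--         return content
--     for tok in ("<fake_token_around_image>", "<end_of_utterance>"):
--         content = content.replace(tok, "")
--     if "smoldocling" in model.lower():
--         content = _first_doctag(content)
--     # stateless sliding-window filter: a line is dropped exactly when it equals
--     # its three predecessors, i.e. it is the 4th-or-later line of a run
--     lines = content.split('\n')
--     pad = [None, None, None] + lines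
--     content = '\n'.join(l for l, p1, p2, p3 in zip(lines, pad[2:], pad[1:], pad)
--                         if l != p1 or l != p2 or l != p3)
--     if len(content) > 10000:
--         content = content[:10000] + "\n[Content truncated due to length]"
--     return content.strip()
-- ===== Notes on version B (the rewrite author's own statement) =====
-- stated objective: alternative
-- what changed: The stateful last_line/repeat_count duplicate filter becomes a stateless sliding-window filter (a line is kept iff it differs from one of its three predecessors, computed with a padded zip over the line list), and the doctag stop-marker cascade becomes next() over a tuple of candidate positions.
import Mathlib
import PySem

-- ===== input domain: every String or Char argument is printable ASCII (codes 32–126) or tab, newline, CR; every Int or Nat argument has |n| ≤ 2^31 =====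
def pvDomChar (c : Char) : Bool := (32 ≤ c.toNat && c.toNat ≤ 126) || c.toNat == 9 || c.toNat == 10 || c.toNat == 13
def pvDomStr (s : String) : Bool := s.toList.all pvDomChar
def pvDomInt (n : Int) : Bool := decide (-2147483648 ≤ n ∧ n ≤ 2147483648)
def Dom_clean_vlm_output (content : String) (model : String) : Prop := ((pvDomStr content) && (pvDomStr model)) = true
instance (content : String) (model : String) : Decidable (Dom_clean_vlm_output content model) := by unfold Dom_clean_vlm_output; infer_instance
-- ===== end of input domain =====

-- B replaces A's stateful last_line/repeat_count duplicate filter by a stateless sliding-window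
-- filter over a padded zip of the line list (a line is kept iff it differs from one of its three
-- predecessors) and the doctag stop-marker cascade by a first-hit search over candidate positions;
-- same return value, no speed claim.


-- ===== PORT A =====
-- the body of A's `for line in lines` loop, state = (cleaned_lines, last_line, repeat_count)
def aDedupStep (st : List (List Char) × Option (List Char) × Nat) (line : List Char) :
    List (List Char) × Option (List Char) × Nat :=
  if some line = st.2.1 then
    if st.2.2 + 1 < 3 then (st.1 ++ [line], st.2.1, st.2.2 + 1)
    else (st.1, st.2.1, st.2.2 + 1)
  else (st.1 ++ [line], some line, 0)

def clean_vlm_output (content : String) (model : String) : String :=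
  if content = "" then content
  else
    let c := content.toList
    let c := PySem.Chars.replace c "<fake_token_around_image>".toList "".toList
    let c := PySem.Chars.replace c "<end_of_utterance>".toList "".toList
    let c :=
      if PySem.Chars.isIn "smoldocling".toList (PySem.Chars.lower model.toList)
          && PySem.Chars.isIn "<doctag>".toList c then
        let start := PySem.Chars.find c "<doctag>".toList
        if start ≠ -1 then
          let e0 := PySem.Chars.findFrom c "</doctag>".toList start
          let e :=
            if e0 = -1 then
              let e1 := PySem.Chars.findFrom c "\nUser:".toList start
              let e2 := if e1 = -1 then PySem.Chars.findFrom c "Assistant:".toList start else e1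
              let e3 := if e2 = -1 then PySem.Chars.findFrom c "<doctag>".toList (start + 8) else e2
              if e3 = -1 then min (start + 2000) (PySem.Chars.len c) else e3
            else e0 + 9
          PySem.Chars.slice c (some start) (some e)
        else c
      else c
    let lines := PySem.Chars.splitOn c "\n".toList
    let st := lines.foldl aDedupStep ([], none, 0)
    let c := PySem.Chars.join "\n".toList st.1
    let c :=
      if PySem.Chars.len c > 10000 then
        PySem.Chars.slice c none (some 10000) ++ "\n[Content truncated due to length]".toList
      else c
    String.ofList (PySem.Chars.strip c)

-- ===== PORT B =====
def pvFirstDoctag (c : List Char) : List Char :=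
  let start := PySem.Chars.find c "<doctag>".toList
  if start = -1 then c
  else
    let e := PySem.Chars.findFrom c "</doctag>".toList start
    if e ≠ -1 then PySem.Chars.slice c (some start) (some (e + 9))
    else
      let cands := [PySem.Chars.findFrom c "\nUser:".toList start,
                    PySem.Chars.findFrom c "Assistant:".toList start,
                    PySem.Chars.findFrom c "<doctag>".toList (start + 8)]
      let e := (cands.find? (fun p => p != -1)).getD (min (start + 2000) (PySem.Chars.len c))
      PySem.Chars.slice c (some start) (some e)

def clean_vlm_output_alt (content : String) (model : String) : String :=
  if content = "" then content
  else
    let c := content.toList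
    let c := PySem.Chars.replace c "<fake_token_around_image>".toList "".toList
    let c := PySem.Chars.replace c "<end_of_utterance>".toList "".toList
    let c :=
      if PySem.Chars.isIn "smoldocling".toList (PySem.Chars.lower model.toList) then
        pvFirstDoctag c
      else c
    -- stateless sliding-window filter: keep a line iff it differs from one of its three predecessors
    let lines := PySem.Chars.splitOn c "\n".toList
    let pad : List (Option (List Char)) := [none, none, none] ++ lines.map some
    let kept := ((lines.zip ((pad.drop 2).zip ((pad.drop 1).zip pad))).filter
        (fun t => some t.1 != t.2.1 || some t.1 != t.2.2.1 || some t.1 != t.2.2.2)).map (fun t => t.1)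
    let c := PySem.Chars.join "\n".toList kept
    let c :=
      if PySem.Chars.len c > 10000 then
        PySem.Chars.slice c none (some 10000) ++ "\n[Content truncated due to length]".toList
      else c
    String.ofList (PySem.Chars.strip c)

-- ===== PRECONDITION & SPEC =====
def Spec_clean_vlm_output (content : String) (model : String) (out : String) : Prop := out = clean_vlm_output_alt content model
instance (content : String) (model : String) (out : String) : Decidable (Spec_clean_vlm_output content model out) := by unfold Spec_clean_vlm_output; infer_instance

-- ===== CLAIM (what is proved, stated in full; the proofs are below) =====
def Claim_equal_clean_vlm_output : Prop := ∀ (content : String) (model : String), Dom_clean_vlm_output content model → Spec_clean_vlm_output content model (clean_vlm_output content model)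

-- ===== LEMMAS AND PROOFS =====

-- first-hit over the candidate stop positions equals A's if-cascade
lemma find3 (u a d m : Int) :
    (if (if (if u = -1 then a else u) = -1 then d else (if u = -1 then a else u)) = -1 then m
     else (if (if u = -1 then a else u) = -1 then d else (if u = -1 then a else u)))
    = (([u, a, d].find? (fun p => p != -1)).getD m) := by
  by_cases hu : u = -1 <;> by_cases ha : a = -1 <;> by_cases hd : d = -1 <;>
    simp [hu, ha, hd, bne_iff_ne.mpr]

-- A's inline doctag block equals B's helper (guarded only by the model test)
lemma doctag_eq (c : List Char) (smol : Bool) :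
    (if smol && PySem.Chars.isIn "<doctag>".toList c then
        let start := PySem.Chars.find c "<doctag>".toList
        if start ≠ -1 then
          let e0 := PySem.Chars.findFrom c "</doctag>".toList start
          let e :=
            if e0 = -1 then
              let e1 := PySem.Chars.findFrom c "\nUser:".toList start
              let e2 := if e1 = -1 then PySem.Chars.findFrom c "Assistant:".toList start else e1
              let e3 := if e2 = -1 then PySem.Chars.findFrom c "<doctag>".toList (start + 8) else e2
              if e3 = -1 then min (start + 2000) (PySem.Chars.len c) else e3
            else e0 + 9
          PySem.Chars.slice c (some start) (some e)
        else c
      else c) = (if smol then pvFirstDoctag c else c) := by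
  cases smol with
  | false => simp
  | true =>
    simp only [Bool.true_and, if_true]
    by_cases hin : PySem.Chars.isIn "<doctag>".toList c = true
    · have hfind : PySem.Chars.find c "<doctag>".toList ≠ -1 := by
        rw [PySem.Chars.find_ne_neg_one_iff]
        exact (PySem.Chars.isIn_iff_infix _ _).mp hin
      rw [if_pos hin]
      unfold pvFirstDoctag
      simp only [hfind, ite_not, if_false]
      by_cases h0 : PySem.Chars.findFrom c "</doctag>".toList (PySem.Chars.find c "<doctag>".toList) = -1
      · simp only [h0, if_pos]
        rw [find3]
      · simp_all
    · have hfind : PySem.Chars.find c "<doctag>".toList = -1 := by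
        rw [PySem.Chars.find_eq_neg_one_iff]
        intro hinf
        exact hin ((PySem.Chars.isIn_iff_infix _ _).mpr hinf)
      rw [if_neg hin]
      simp only [pvFirstDoctag]
      rw [if_pos hfind]

-- recursion scheme of B's windowed filter, used only in the proofs
def bfilt : Option (List Char) → Option (List Char) → Option (List Char) → List (List Char) → List (List Char)
  | _, _, _, [] => []
  | h1, h2, h3, x :: rest =>
      (if (some x != h1 || some x != h2 || some x != h3) then [x] else []) ++ bfilt (some x) h1 h2 rest

lemma zip_eq_bfilt (lines : List (List Char)) : ∀ (h1 h2 h3 : Option (List Char)),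
    (((lines.zip ((h1 :: lines.map some).zip ((h2 :: h1 :: lines.map some).zip
        (h3 :: h2 :: h1 :: lines.map some)))).filter
      (fun t => some t.1 != t.2.1 || some t.1 != t.2.2.1 || some t.1 != t.2.2.2)).map (fun t => t.1))
    = bfilt h1 h2 h3 lines := by
  induction lines with
  | nil => intro h1 h2 h3; simp [bfilt]
  | cons x rest ih =>
    intro h1 h2 h3
    simp only [List.map_cons, List.zip_cons_cons, List.filter_cons, bfilt]
    by_cases hc : (some x != h1 || some x != h2 || some x != h3) = true
    · simp only [hc, if_true, List.map_cons]
      simpa [List.zip_cons_cons] using ih (some x) h1 h2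
    · simp only [hc, Bool.false_eq_true, if_false, List.nil_append]
      simpa [List.zip_cons_cons] using ih (some x) h1 h2

-- the state correspondence between A's (last_line, repeat_count) and B's three-line window
def DedupInv (last : Option (List Char)) (cnt : Nat) (h1 h2 h3 : Option (List Char)) : Prop :=
  h1 = last ∧
  (cnt = 0 → h2 ≠ last ∨ last = none) ∧
  (cnt = 1 → h2 = last ∧ h3 ≠ last) ∧
  (2 ≤ cnt → h2 = last ∧ h3 = last)

lemma fold_eq_bfilt (lines : List (List Char)) : ∀ (acc : List (List Char))
    (last : Option (List Char)) (cnt : Nat) (h1 h2 h3 : Option (List Char)),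
    DedupInv last cnt h1 h2 h3 →
    (lines.foldl aDedupStep (acc, last, cnt)).1 = acc ++ bfilt h1 h2 h3 lines := by
  induction lines with
  | nil => intro acc last cnt h1 h2 h3 _; simp [bfilt]
  | cons y rest ih =>
    intro acc last cnt h1 h2 h3 hinv
    obtain ⟨hh1, hc0, hc1, hc2⟩ := hinv
    rw [List.foldl_cons]
    by_cases hy : some y = last
    · -- equal to last line
      rcases Nat.lt_or_ge cnt 2 with hlt | hge
      · -- cnt ∈ {0,1}: A keeps, B keeps
        have hkeep : aDedupStep (acc, last, cnt) y = (acc ++ [y], last, cnt + 1) := by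
          simp only [aDedupStep, hy, if_pos]
          rw [if_pos (by omega)]
        rw [hkeep, ih (acc ++ [y]) last (cnt + 1) (some y) h1 h2 ?_]
        · rw [bfilt]
          have hcond : (some y != h1 || some y != h2 || some y != h3) = true := by
            interval_cases cnt
            · rcases hc0 rfl with hne | hnone
              · simp only [Bool.or_eq_true, bne_iff_ne]
                exact Or.inl (Or.inr (fun hc => hne (hc.symm.trans hy)))
              · exact absurd (hy.trans hnone) (by simp)
            · obtain ⟨_, h3ne⟩ := hc1 rfl
              simp only [Bool.or_eq_true, bne_iff_ne]
              exact Or.inr (fun hc => h3ne (hc.symm.trans hy))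
          rw [hcond, if_pos rfl, hy]
          simp
        · refine ⟨hy, fun h => absurd h (by omega), fun h => ⟨hh1, ?_⟩, fun h => ⟨hh1, ?_⟩⟩
          · -- cnt + 1 = 1 → cnt = 0; new h3 = h2 ≠ last
            have hcnt0 : cnt = 0 := by omega
            rcases hc0 hcnt0 with hne | hnone
            · exact hne
            · exact absurd (hy.trans hnone) (by simp)
          · -- 2 ≤ cnt + 1 → 1 ≤ cnt; new h3 = h2 = last
            rcases Nat.lt_or_ge cnt 2 with hl | hg
            · exact (hc1 (by omega)).1
            · exact (hc2 hg).1
      · -- cnt ≥ 2: A drops, B drops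
        have hdrop : aDedupStep (acc, last, cnt) y = (acc, last, cnt + 1) := by
          simp only [aDedupStep, hy, if_pos]
          rw [if_neg (by omega)]
        rw [hdrop, ih acc last (cnt + 1) (some y) h1 h2 ?_]
        · rw [bfilt]
          obtain ⟨h2e, h3e⟩ := hc2 hge
          have hcond : (some y != h1 || some y != h2 || some y != h3) = false := by
            simp [hh1, h2e, h3e, hy]
          rw [hcond]
          simp
        · exact ⟨hy, fun h => absurd h (by omega), fun h => absurd h (by omega),
            fun h => ⟨hh1, (hc2 hge).1⟩⟩
    · -- different line: A appends and resets, B keeps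
      have hstep : aDedupStep (acc, last, cnt) y = (acc ++ [y], some y, 0) := by
        simp [aDedupStep, hy]
      rw [hstep, ih (acc ++ [y]) (some y) 0 (some y) h1 h2 ?_]
      · rw [bfilt]
        have hcond : (some y != h1 || some y != h2 || some y != h3) = true := by
          simp only [Bool.or_eq_true, bne_iff_ne]
          exact Or.inl (Or.inl (fun hc => hy (hc.trans hh1)))
        rw [hcond, if_pos rfl]
        simp
      · exact ⟨rfl, fun _ => Or.inl (fun hc => hy (hc.symm.trans hh1)),
          fun h => absurd h (by omega), fun h => absurd h (by omega)⟩

-- A's stateful loop equals B's padded-zip window filter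
lemma dedup_eq (lines : List (List Char)) :
    (((lines.zip (((([none, none, none] : List (Option (List Char))) ++ lines.map some).drop 2).zip
        (((([none, none, none] : List (Option (List Char))) ++ lines.map some).drop 1).zip
          (([none, none, none] : List (Option (List Char))) ++ lines.map some)))).filter
      (fun t => some t.1 != t.2.1 || some t.1 != t.2.2.1 || some t.1 != t.2.2.2)).map (fun t => t.1))
    = (lines.foldl aDedupStep ([], none, 0)).1 := by
  have hdrop2 : (([none, none, none] : List (Option (List Char))) ++ lines.map some).drop 2 =
      none :: lines.map some := rfl
  have hdrop1 : (([none, none, none] : List (Option (List Char))) ++ lines.map some).drop 1 =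
      none :: none :: lines.map some := rfl
  have hpad : (([none, none, none] : List (Option (List Char))) ++ lines.map some) =
      none :: none :: none :: lines.map some := rfl
  rw [hdrop2, hdrop1, hpad, zip_eq_bfilt,
    fold_eq_bfilt lines [] none 0 none none none ⟨rfl, fun _ => Or.inr rfl, fun h => by omega, fun h => by omega⟩]
  simp

-- ===== VERDICT (by name: the statement is the Claim_ definition above) =====
theorem clean_vlm_output_spec : Claim_equal_clean_vlm_output := by
  intro content model _
  unfold Spec_clean_vlm_output clean_vlm_output clean_vlm_output_alt
  by_cases h : content = ""
  · simp [h]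
  · simp only [h, if_false]
    simp only [doctag_eq, dedup_eq]
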